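-- pv_equiv track=rewrite | github.com/raniataha049/bitpackingproject | bitpacking/core.py | unpack_bits
-- ===== SOURCE A (Python) =====
-- WORD_BITS = 32
--
-- def unpack_bits(words: list[int], start_bit: int, width: int) -> int:
--     """
--     Read 'width' bits starting at absolute bit index 'start_bit' from 'words'
--     and return it as a non-negative int.
--     Bits beyond current words length are treated as zeros.
--     """
--     if width < 0:
--         raise ValueError("width must be >= 0")
--     if width == 0:
--         return 0
--
--     pos = start_bit
--     remaining = width
--     out = 0
--     shift = 0
--
--     while remaining > 0:
--         wi = pos // WORD_BITS
--         bo = pos % WORD_BITS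
--         chunk = min(remaining, WORD_BITS - bo)
--
--         if wi >= len(words):
--             piece = 0
--         else:
--             lowmask = (1 << chunk) - 1
--             piece = (words[wi] >> bo) & lowmask
--
--         out |= (piece << shift)
--         pos += chunk
--         shift += chunk
--         remaining -= chunk
--
--     return out
-- ===== SOURCE B (Python) =====
-- WORD_BITS = 32
--
-- def unpack_bits(words, start_bit, width):
--     """Concatenate the covered words into one big integer, then extract once.
--     Bits beyond the current words length are treated as zeros."""
--     if width < 0:
--         raise ValueError("width must be >= 0")
--     if width == 0:
--         return 0
--     first = start_bit // WORD_BITS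
--     last = (start_bit + width - 1) // WORD_BITS
--     acc = 0
--     for i in range(first, last + 1):
--         if i < len(words):
--             acc |= (words[i] & 0xFFFFFFFF) << (WORD_BITS * (i - first))
--     bo = start_bit - WORD_BITS * first
--     return (acc >> bo) & ((1 << width) - 1)
-- ===== Notes on version B (the rewrite author's own statement) =====
-- stated objective: simpler
-- what changed: A's per-chunk loop (floordiv/mod/min bookkeeping, masking and re-shifting each partial chunk) is replaced by a concatenate-then-extract decomposition: one pass OR-ing each covered word into a single big integer, followed by a single shift-and-mask extraction.
import Mathlib
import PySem

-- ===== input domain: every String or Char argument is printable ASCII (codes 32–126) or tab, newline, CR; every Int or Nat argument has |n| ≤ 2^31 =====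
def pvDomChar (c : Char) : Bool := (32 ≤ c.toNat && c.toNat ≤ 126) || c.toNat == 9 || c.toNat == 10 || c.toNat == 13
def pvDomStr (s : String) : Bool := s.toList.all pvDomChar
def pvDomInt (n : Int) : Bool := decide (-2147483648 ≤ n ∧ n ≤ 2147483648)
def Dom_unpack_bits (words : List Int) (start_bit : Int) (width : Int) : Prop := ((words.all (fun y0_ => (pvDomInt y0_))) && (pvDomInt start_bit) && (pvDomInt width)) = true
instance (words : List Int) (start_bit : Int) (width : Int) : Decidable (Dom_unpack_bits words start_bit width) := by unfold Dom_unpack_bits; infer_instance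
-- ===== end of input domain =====

-- B replaces A's per-chunk mask/shift/accumulate loop by OR-ing the covered words into one
-- big integer and extracting the field with a single shift-and-mask (objective: simpler).
-- Like A, B indexes words with Python semantics and treats bits beyond the end as zeros.

-- ===== PORT A =====
-- A's while-loop with state (pos, remaining, out, shift) exactly as in the Python;
-- the Nat fuel only makes the recursion structural: each iteration consumes chunk ≥ 1
-- of remaining, so fuel = width.toNat ≥ remaining suffices and the guard never fires.
def unpackLoop (words : List Int) : Nat → Int → Int → Int → Int → Int
  | 0, _, _, out, _ => out
  | fuel + 1, pos, remaining, out, shift =>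
    if 0 < remaining then
      let wi := PySem.Int.floordiv pos 32
      let bo := PySem.Int.mod pos 32
      let chunk := min remaining (32 - bo)
      let piece : Int :=
        if PySem.List.len words ≤ wi then 0
        else PySem.Int.band ((PySem.List.pyGetD words wi 0) >>> bo.toNat)
               ((1 <<< chunk.toNat) - 1)
      unpackLoop words fuel (pos + chunk) (remaining - chunk)
        (PySem.Int.bor out (piece <<< shift.toNat)) (shift + chunk)
    else out

def unpack_bits (words : List Int) (start_bit : Int) (width : Int) : Int :=
  if width < 0 then 0   -- Python raises ValueError here; excluded by Pre_
  else if width = 0 then 0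
  else unpackLoop words width.toNat start_bit width 0 0

-- ===== PORT B =====
def unpack_bits_alt (words : List Int) (start_bit : Int) (width : Int) : Int :=
  if width < 0 then 0   -- Python raises ValueError here; excluded by Pre_
  else if width = 0 then 0
  else
    let first := PySem.Int.floordiv start_bit 32
    let last := PySem.Int.floordiv (start_bit + width - 1) 32
    let acc := (PySem.List.pyRange first (last + 1) 1).foldl
      (fun acc i =>
        if i < PySem.List.len words then
          PySem.Int.bor acc
            ((PySem.Int.band (PySem.List.pyGetD words i 0) 4294967295) <<< (32 * (i - first)).toNat)
        else acc) 0
    let bo := start_bit - 32 * first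
    PySem.Int.band (acc >>> bo.toNat) ((1 <<< width.toNat) - 1)

-- ===== PRECONDITION & SPEC =====
-- Pre_ excludes only inputs where A raises: width < 0 (ValueError) and
-- start_bit//32 < -len(words) with width > 0 (IndexError from a negative list index).
def Pre_unpack_bits (words : List Int) (start_bit : Int) (width : Int) : Prop :=
  0 ≤ width ∧ (width = 0 ∨ -(words.length : Int) ≤ PySem.Int.floordiv start_bit 32)
instance (words : List Int) (start_bit : Int) (width : Int) : Decidable (Pre_unpack_bits words start_bit width) := by unfold Pre_unpack_bits; infer_instance
def pvWitness_unpack_bits : List Int × Int × Int := ([5, 7], 3, 8)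

def Spec_unpack_bits (words : List Int) (start_bit : Int) (width : Int) (out : Int) : Prop := out = unpack_bits_alt words start_bit width
instance (words : List Int) (start_bit : Int) (width : Int) (out : Int) : Decidable (Spec_unpack_bits words start_bit width out) := by unfold Spec_unpack_bits; infer_instance

-- ===== CLAIM (what is proved, stated in full; the proofs are below) =====
def Claim_equal_unpack_bits : Prop := ∀ (words : List Int) (start_bit : Int) (width : Int), Dom_unpack_bits words start_bit width → Pre_unpack_bits words start_bit width → Spec_unpack_bits words start_bit width (unpack_bits words start_bit width)

-- ===== LEMMAS AND PROOFS =====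

-- the words seen as one big little-endian integer of 32-bit limbs
def XN : List Int → Nat
  | [] => 0
  | w :: t => (w % (2 ^ 32 : Int)).toNat + 2 ^ 32 * XN t

lemma emod32_lt (w : Int) : (w % (2 ^ 32 : Int)).toNat < 2 ^ 32 := by
  have h1 := Int.emod_nonneg w (b := 2 ^ 32) (by positivity)
  have h2 := Int.emod_lt_of_pos w (b := 2 ^ 32) (by positivity)
  norm_num at h1 h2 ⊢
  omega

lemma XN_lt (ws : List Int) : XN ws < 2 ^ (32 * ws.length) := by
  induction ws with
  | nil => simp [XN]
  | cons w t ih =>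
      have hm := emod32_lt w
      simp only [XN, List.length_cons]
      have hpow : (2 : Nat) ^ (32 * (t.length + 1)) = 2 ^ 32 * 2 ^ (32 * t.length) := by ring
      rw [hpow]
      nlinarith [ih, hm]

lemma XN_div_pow32 (k : Nat) : ∀ (ws : List Int), XN ws / 2 ^ (32 * k) = XN (ws.drop k) := by
  induction k with
  | zero => intro ws; simp
  | succ k ih =>
      intro ws
      cases ws with
      | nil => simp [XN]
      | cons w t =>
          have hm := emod32_lt w
          have hpow : (2 : Nat) ^ (32 * (k + 1)) = 2 ^ 32 * 2 ^ (32 * k) := by ring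
          rw [hpow, ← Nat.div_div_eq_div_mul]
          have h1 : XN (w :: t) / 2 ^ 32 = XN t := by
            simp only [XN]
            rw [Nat.add_mul_div_left _ _ (by positivity), Nat.div_eq_of_lt hm, Nat.zero_add]
          rw [h1, ih t]
          simp

lemma XN_mod_pow32 (k : Nat) : ∀ (ws : List Int), XN ws % 2 ^ (32 * k) = XN (ws.take k) := by
  induction k with
  | zero => intro ws; simp [XN, Nat.mod_one]
  | succ k ih =>
      intro ws
      cases ws with
      | nil => simp [XN]
      | cons w t =>
          have hm := emod32_lt w
          have hpow : (2 : Nat) ^ (32 * (k + 1)) = 2 ^ 32 * 2 ^ (32 * k) := by ring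
          rw [hpow, Nat.mod_mul]
          simp only [XN, List.take_succ_cons]
          rw [Nat.add_mul_mod_self_left, Nat.mod_eq_of_lt hm,
              Nat.add_mul_div_left _ _ (by positivity : 0 < 2 ^ 32),
              Nat.div_eq_of_lt hm, Nat.zero_add, ih t]

lemma XN_append_singleton (v : Int) : ∀ (xs : List Int),
    XN (xs ++ [v]) = XN xs + (v % (2 ^ 32 : Int)).toNat * 2 ^ (32 * xs.length) := by
  intro xs
  induction xs with
  | nil => simp [XN]
  | cons w t ih =>
      simp only [List.cons_append, XN, ih, List.length_cons]
      have hpow : (2 : Nat) ^ (32 * (t.length + 1)) = 2 ^ 32 * 2 ^ (32 * t.length) := by ring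
      rw [hpow]; ring

-- Python's  x & (2^c - 1)  is  x mod 2^c, also for negative x
lemma band_two_pow_sub_one (x : Int) (c : Nat) :
    PySem.Int.band x (((2 ^ c : Nat) : Int) - 1) = x % ((2 : Int) ^ c) := by
  have h1 : (1 : Nat) ≤ 2 ^ c := Nat.one_le_two_pow
  have hc : ((2 : Int) ^ c) = ((2 ^ c : Nat) : Int) := by push_cast; ring
  have hmask : (0 : Int) ≤ ((2 ^ c : Nat) : Int) - 1 := by omega
  have hmasknat : (((2 ^ c : Nat) : Int) - 1).toNat = 2 ^ c - 1 := by omega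
  by_cases hx : 0 ≤ x
  · rw [PySem.Int.band_of_nonneg hx hmask, hmasknat, Nat.and_two_pow_sub_one_eq_mod]
    conv_rhs => rw [← Int.toNat_of_nonneg hx]
    rw [hc, ← Int.natCast_mod]
  · have hxneg : ¬ (0 : Int) ≤ x := hx
    have hxlt : x < 0 := by omega
    simp only [PySem.Int.band, if_neg hxneg, if_pos hmask, hmasknat]
    set y : Nat := (-x - 1).toNat with hy
    have hxy : x = -(y : Int) - 1 := by omega
    have hmodlt : y % 2 ^ c < 2 ^ c := Nat.mod_lt _ (by omega)
    have hand : (2 ^ c - 1) &&& y = y % 2 ^ c := by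
      rw [Nat.and_comm, Nat.and_two_pow_sub_one_eq_mod]
    rw [hand, hc, hxy]
    have hdm : ((y % 2 ^ c : Nat) : Int) + ((2 ^ c : Nat) : Int) * ((y / 2 ^ c : Nat) : Int) = (y : Int) := by
      exact_mod_cast congrArg (Nat.cast : Nat → Int) (Nat.mod_add_div y (2 ^ c))
    have hsplit : -(y : Int) - 1 =
        (((2 ^ c : Nat) : Int) - 1 - ((y % 2 ^ c : Nat) : Int)) +
          ((2 ^ c : Nat) : Int) * (-((y / 2 ^ c : Nat) : Int) - 1) := by linear_combination hdm
    rw [hsplit, Int.add_mul_emod_self_left]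
    rw [Int.emod_eq_of_lt (by omega) (by omega)]
    omega

-- Python's  (w >> b) & (2^c - 1)  reads bits b..b+c-1, inside w mod 2^32 when b+c ≤ 32
lemma piece_eq (w : Int) (b c : Nat) (h : b + c ≤ 32) :
    PySem.Int.band (w >>> b) (((2 ^ c : Nat) : Int) - 1) =
      (((w % (2 ^ 32 : Int)).toNat / 2 ^ b % 2 ^ c : Nat) : Int) := by
  rw [band_two_pow_sub_one, Int.shiftRight_eq_div_pow]
  set mN : Nat := (w % (2 ^ 32 : Int)).toNat with hmN
  have hnn : (0 : Int) ≤ w % (2 ^ 32 : Int) := Int.emod_nonneg w (by positivity)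
  have hm : w % ((2 : Int) ^ 32) = (mN : Int) := (Int.toNat_of_nonneg hnn).symm
  have hpow : ((2 ^ b : Nat) : Int) * ((2 ^ (32 - b) : Nat) : Int) = (2 : Int) ^ 32 := by
    push_cast
    rw [← pow_add, show b + (32 - b) = 32 from by omega]
    norm_num
  have hw : w = (mN : Int) + ((2 ^ b : Nat) : Int) *
      (((2 ^ (32 - b) : Nat) : Int) * (w / 2 ^ 32)) := by
    have hdm := Int.mul_ediv_add_emod w (2 ^ 32)
    rw [hm] at hdm
    rw [← mul_assoc, hpow]
    linarith [hdm]
  conv_lhs => rw [hw]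
  rw [Int.add_mul_ediv_left _ _ (by positivity : ((2 ^ b : Nat) : Int) ≠ 0)]
  have h2c : ((2 : Int) ^ c) = ((2 ^ c : Nat) : Int) := by push_cast; ring
  have hks : ((2 ^ (32 - b) : Nat) : Int) * (w / 2 ^ 32) =
      ((2 ^ c : Nat) : Int) * (((2 ^ (32 - b - c) : Nat) : Int) * (w / 2 ^ 32)) := by
    rw [← mul_assoc]
    congr 1
    push_cast
    rw [← pow_add, show c + (32 - b - c) = 32 - b from by omega]
  rw [hks, h2c, Int.add_mul_emod_self_left]
  push_cast
  rfl

-- OR of bit-disjoint parts is addition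
lemma bor_shift_eq_add (aN bN s : Nat) (h : aN < 2 ^ s) :
    PySem.Int.bor (aN : Int) ((bN : Int) <<< s) = ((aN + bN * 2 ^ s : Nat) : Int) := by
  rw [← Int.natCast_shiftLeft, PySem.Int.bor_natCast]
  congr 1
  rw [Nat.lor_comm, ← Nat.shiftLeft_add_eq_or_of_lt h, Nat.shiftLeft_eq]
  omega

lemma div_mod_chunk (m rest b c : Nat) (h : b + c ≤ 32) :
    (m + 2 ^ 32 * rest) / 2 ^ b % 2 ^ c = m / 2 ^ b % 2 ^ c := by
  have hpow : (2 : Nat) ^ 32 = 2 ^ b * 2 ^ (32 - b) := by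
    rw [← pow_add]; congr 1; omega
  rw [hpow, mul_assoc, Nat.add_mul_div_left _ _ (by positivity : 0 < 2 ^ b)]
  have hpow2 : (2 : Nat) ^ (32 - b) = 2 ^ c * 2 ^ (32 - b - c) := by
    rw [← pow_add]; congr 1; omega
  rw [hpow2, mul_assoc, Nat.add_mul_mod_self_left]

lemma mod_pow_div_mod (Y b c M : Nat) (h : b + c ≤ M) :
    (Y % 2 ^ M) / 2 ^ b % 2 ^ c = Y / 2 ^ b % 2 ^ c := by
  have hpow : (2 : Nat) ^ M = 2 ^ b * 2 ^ (M - b) := by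
    rw [← pow_add]; congr 1; omega
  rw [hpow, Nat.mod_mul, Nat.add_mul_div_left _ _ (by positivity : 0 < 2 ^ b),
      Nat.div_eq_of_lt (Nat.mod_lt _ (by positivity)), Nat.zero_add,
      Nat.mod_mod_of_dvd _ (pow_dvd_pow 2 (by omega))]

-- words as read by the loops: index i of words maps to position i - first; Python's
-- negative indexing makes indices first..-1 read from the end of the list
def viewFrom (words : List Int) (first : Int) : List Int :=
  if first < 0 then words.drop (words.length + first).toNat ++ words
  else words.drop first.toNat

lemma viewFrom_length (words : List Int) (first : Int) (hf : -(words.length : Int) ≤ first) :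
    (viewFrom words first).length = ((words.length : Int) - first).toNat := by
  unfold viewFrom
  split_ifs with h
  · simp only [List.length_append, List.length_drop]
    omega
  · simp only [List.length_drop]
    omega

-- what Python's words[first + j] (default 0 past the end) reads, as a plain list lookup
lemma viewFrom_getD (words : List Int) (first : Int) (hf : -(words.length : Int) ≤ first)
    (j : Nat) :
    PySem.List.pyGetD words (first + (j : Int)) 0 = (viewFrom words first).getD j 0 := by
  have hV := viewFrom_length words first hf
  rw [List.getD_eq_getElem?_getD]
  by_cases h0 : 0 ≤ first + (j : Int)
  · by_cases h1 : first + (j : Int) < (words.length : Int)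
    · rw [PySem.List.pyGetD_eq_getElem _ _ h0 (by exact_mod_cast h1)]
      unfold viewFrom
      split_ifs with hneg
      · rw [List.getElem?_append_right (by simp; omega)]
        simp only [List.length_drop]
        rw [show j - (words.length - (words.length + first).toNat) =
              (first + (j : Int)).toNat from by omega,
            List.getElem?_eq_getElem (by omega), Option.getD_some]
      · rw [List.getElem?_drop,
            show first.toNat + j = (first + (j : Int)).toNat from by omega,
            List.getElem?_eq_getElem (by omega), Option.getD_some]
    · have hnone : PySem.List.pyGet? words (first + (j : Int)) = none := by
        rw [PySem.List.pyGet?_eq_none_iff]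
        unfold PySem.Raise.InRange
        omega
      rw [PySem.List.pyGetD_of_none _ _ _ hnone,
          List.getElem?_eq_none (by omega : (viewFrom words first).length ≤ j)]
      rfl
  · have hneg : first < 0 := by omega
    set k : Nat := (-(first + (j : Int))).toNat with hk
    have hk1 : 0 < k := by omega
    have hk2 : k ≤ words.length := by omega
    have hidx : first + (j : Int) = -(k : Int) := by omega
    rw [hidx, PySem.List.pyGetD_neg_natCast _ _ _ hk1 hk2]
    unfold viewFrom
    rw [if_pos hneg]
    have hpre : (words.drop (words.length + first).toNat).length =
        words.length - (words.length + first).toNat := by simp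
    rw [List.getElem?_append_left (by omega), List.getElem?_drop,
        show (words.length + first).toNat + j = words.length - k from by omega,
        List.getElem?_eq_getElem (by omega), Option.getD_some]

-- invariant of A's while-loop: positions 32*first + u, u counted from the window start
lemma unpackLoop_eq (words : List Int) (first : Int)
    (hf : -(words.length : Int) ≤ first) :
    ∀ (fuel r u s oN : Nat), r ≤ fuel → oN < 2 ^ s →
    unpackLoop words fuel (32 * first + (u : Int)) (r : Int) (oN : Int) (s : Int) =
      ((oN + 2 ^ s * (XN (viewFrom words first) / 2 ^ u % 2 ^ r) : Nat) : Int) := by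
  have hV := viewFrom_length words first hf
  intro fuel
  induction fuel with
  | zero =>
      intro r u s oN hr _
      interval_cases r
      simp [unpackLoop]
  | succ fuel ih =>
      intro r u s oN hr ho
      rcases Nat.eq_zero_or_pos r with hr0 | hrpos
      · subst hr0; simp [unpackLoop]
      · have hcond : (0 : Int) < (r : Int) := by exact_mod_cast hrpos
        rw [unpackLoop, if_pos hcond]
        have hplt : u % 32 < 32 := Nat.mod_lt _ (by norm_num)
        have hcast32 : ((u : Int)) / 32 = ((u / 32 : Nat) : Int) := by
          exact_mod_cast (Int.natCast_div u 32).symm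
        have hcastm : ((u : Int)) % 32 = ((u % 32 : Nat) : Int) := by
          exact_mod_cast (Int.natCast_mod u 32).symm
        have hfd : PySem.Int.floordiv (32 * first + (u : Int)) 32 =
            first + ((u / 32 : Nat) : Int) := by
          rw [PySem.Int.floordiv_eq_ediv_of_pos (by norm_num),
              show 32 * first + (u : Int) = (u : Int) + 32 * first from by ring,
              Int.add_mul_ediv_left _ first (by norm_num : (32 : Int) ≠ 0), hcast32]
          ring
        have hmd : PySem.Int.mod (32 * first + (u : Int)) 32 = ((u % 32 : Nat) : Int) := by
          rw [PySem.Int.mod_eq_emod_of_pos (by norm_num),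
              show 32 * first + (u : Int) = (u : Int) + 32 * first from by ring,
              Int.add_mul_emod_self_left, hcastm]
        have hcmin : min ((r : Nat) : Int) (32 - ((u % 32 : Nat) : Int)) =
            ((min r (32 - u % 32) : Nat) : Int) := by
          rcases le_total r (32 - u % 32) with hmn | hmn
          · rw [min_eq_left (by omega : ((r : Nat) : Int) ≤ 32 - ((u % 32 : Nat) : Int)),
                min_eq_left hmn]
          · rw [min_eq_right (by omega : (32 - ((u % 32 : Nat) : Int)) ≤ ((r : Nat) : Int)),
                min_eq_right hmn]
            omega
        set c : Nat := min r (32 - u % 32) with hcdef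
        have hc1 : 1 ≤ c := by omega
        have hcr : c ≤ r := by omega
        have hbc : u % 32 + c ≤ 32 := by omega
        simp only [hfd, hmd, hcmin, PySem.List.len_eq, Int.toNat_natCast]
        have hmask : (((1 <<< c : Nat) : Int)) - 1 = ((2 ^ c : Nat) : Int) - 1 := by
          rw [Nat.shiftLeft_eq, Nat.one_mul]
        have hpiece :
            (if ((words.length : Nat) : Int) ≤ first + ((u / 32 : Nat) : Int) then (0 : Int)
             else PySem.Int.band
                    ((PySem.List.pyGetD words (first + ((u / 32 : Nat) : Int)) 0) >>> (u % 32))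
                    ((((1 <<< c : Nat) : Int)) - 1)) =
              ((XN (viewFrom words first) / 2 ^ u % 2 ^ c : Nat) : Int) := by
          by_cases hwi : ((words.length : Nat) : Int) ≤ first + ((u / 32 : Nat) : Int)
          · rw [if_pos hwi]
            have hVu : (viewFrom words first).length ≤ u / 32 := by omega
            have hX0 : XN (viewFrom words first) / 2 ^ u = 0 := by
              apply Nat.div_eq_of_lt
              calc XN (viewFrom words first)
                  < 2 ^ (32 * (viewFrom words first).length) := XN_lt _
                _ ≤ 2 ^ u := Nat.pow_le_pow_right (by norm_num) (by omega)
            rw [hX0]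
            simp
          · rw [if_neg hwi]
            have hVu : u / 32 < (viewFrom words first).length := by omega
            rw [viewFrom_getD words first hf (u / 32),
                List.getD_eq_getElem _ _ hVu, hmask, piece_eq _ _ _ hbc]
            congr 1
            have hdrop : (viewFrom words first).drop (u / 32) =
                (viewFrom words first)[u / 32] :: (viewFrom words first).drop (u / 32 + 1) :=
              List.drop_eq_getElem_cons hVu
            have hXd : XN (viewFrom words first) / 2 ^ (32 * (u / 32)) =
                (((viewFrom words first)[u / 32]'hVu) % (2 ^ 32 : Int)).toNat +
                  2 ^ 32 * XN ((viewFrom words first).drop (u / 32 + 1)) := by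
              rw [XN_div_pow32, hdrop]
              rfl
            have hp : XN (viewFrom words first) / 2 ^ u =
                XN (viewFrom words first) / 2 ^ (32 * (u / 32)) / 2 ^ (u % 32) := by
              rw [Nat.div_div_eq_div_mul, ← pow_add,
                  show 32 * (u / 32) + u % 32 = u from by omega]
            rw [hp, hXd, div_mod_chunk _ _ _ _ hbc]
        rw [hpiece]
        have hpieceN_lt : XN (viewFrom words first) / 2 ^ u % 2 ^ c < 2 ^ c :=
          Nat.mod_lt _ (by positivity)
        rw [bor_shift_eq_add _ _ _ ho]
        have hargs1 : 32 * first + (u : Int) + ((c : Nat) : Int) =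
            32 * first + ((u + c : Nat) : Int) := by push_cast; ring
        have hargs2 : ((r : Nat) : Int) - ((c : Nat) : Int) = ((r - c : Nat) : Int) := by omega
        have hargs3 : ((s : Nat) : Int) + ((c : Nat) : Int) = ((s + c : Nat) : Int) := by
          push_cast; ring
        rw [hargs1, hargs2, hargs3]
        have hbound : oN + (XN (viewFrom words first) / 2 ^ u % 2 ^ c) * 2 ^ s < 2 ^ (s + c) := by
          rw [pow_add]
          nlinarith [hpieceN_lt, ho]
        rw [ih (r - c) (u + c) (s + c) _ (by omega) hbound]
        congr 1
        have hsplitmod : XN (viewFrom words first) / 2 ^ u % 2 ^ r =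
            XN (viewFrom words first) / 2 ^ u % 2 ^ c +
              2 ^ c * (XN (viewFrom words first) / 2 ^ (u + c) % 2 ^ (r - c)) := by
          have hr' : (2 : Nat) ^ r = 2 ^ c * 2 ^ (r - c) := by
            rw [← pow_add]; congr 1; omega
          rw [hr', Nat.mod_mul, Nat.div_div_eq_div_mul, ← pow_add]
        rw [hsplitmod, pow_add]
        ring

lemma unpack_bits_eq (words : List Int) (start_bit width : Int) (hw : 0 < width)
    (hf : -(words.length : Int) ≤ PySem.Int.floordiv start_bit 32) :
    unpack_bits words start_bit width =
      ((XN (viewFrom words (PySem.Int.floordiv start_bit 32)) /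
          2 ^ (PySem.Int.mod start_bit 32).toNat % 2 ^ width.toNat : Nat) : Int) := by
  unfold unpack_bits
  rw [if_neg (by omega), if_neg (by omega)]
  have hdm := PySem.Int.floordiv_mul_add_mod start_bit 32
  have hm0 := PySem.Int.mod_nonneg start_bit (b := 32) (by norm_num)
  have hsb : start_bit =
      32 * PySem.Int.floordiv start_bit 32 + (((PySem.Int.mod start_bit 32).toNat : Nat) : Int) := by
    omega
  have hwid : width = ((width.toNat : Nat) : Int) := by omega
  conv_lhs => rw [hsb, hwid]
  rw [Int.toNat_natCast, show (0 : Int) = ((0 : Nat) : Int) from by norm_num]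
  rw [unpackLoop_eq words _ hf width.toNat width.toNat _ 0 0 (le_refl _) (by norm_num)]
  norm_num

-- invariant of B's accumulation loop over the word range starting at F
lemma acc_eq (words : List Int) (F : Int) (hf : -(words.length : Int) ≤ F) : ∀ (t : Nat),
    ((PySem.List.pyRange F (F + (t : Int)) 1).foldl
      (fun acc i =>
        if i < PySem.List.len words then
          PySem.Int.bor acc
            ((PySem.Int.band (PySem.List.pyGetD words i 0) 4294967295) <<< (32 * (i - F)).toNat)
        else acc) 0) = ((XN ((viewFrom words F).take t) : Nat) : Int) := by
  have hV := viewFrom_length words F hf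
  intro t
  induction t with
  | zero =>
      rw [show (F + ((0 : Nat) : Int)) = F from by push_cast; ring,
          PySem.List.pyRange_one_eq_nil (le_refl _)]
      simp [XN]
  | succ t ih =>
      rw [show (F + ((t + 1 : Nat) : Int)) = (F + (t : Int)) + 1 from by push_cast; ring,
          PySem.List.pyRange_one_succ_right (by omega), List.foldl_append, ih]
      simp only [List.foldl_cons, List.foldl_nil]
      have hlen : ((viewFrom words F).take t).length ≤ t := by
        simp [List.length_take]
      have haccN_lt : XN ((viewFrom words F).take t) < 2 ^ (32 * t) :=
        lt_of_lt_of_le (XN_lt _) (Nat.pow_le_pow_right (by norm_num) (by omega))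
      by_cases hin : F + (t : Int) < (words.length : Int)
      · rw [if_pos (by rw [PySem.List.len_eq]; exact hin)]
        have htV : t < (viewFrom words F).length := by omega
        have hget : PySem.List.pyGetD words (F + (t : Int)) 0 = (viewFrom words F)[t] := by
          rw [viewFrom_getD words F hf t, List.getD_eq_getElem _ _ htV]
        have hsh : (32 * ((F + (t : Int)) - F)).toNat = 32 * t := by omega
        have hmcast : PySem.Int.band ((viewFrom words F)[t]'htV) 4294967295 =
            (((((viewFrom words F)[t]'htV) % (2 ^ 32 : Int)).toNat : Nat) : Int) := by
          rw [show (4294967295 : Int) = ((2 ^ 32 : Nat) : Int) - 1 from by norm_num,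
              band_two_pow_sub_one]
          exact (Int.toNat_of_nonneg (Int.emod_nonneg _ (by positivity))).symm
        rw [hget, hsh, hmcast, bor_shift_eq_add _ _ _ haccN_lt]
        congr 1
        rw [List.take_add_one, List.getElem?_eq_getElem htV]
        simp only [Option.toList_some]
        rw [XN_append_singleton]
        have hlent : ((viewFrom words F).take t).length = t := by
          simp [List.length_take]
          omega
        rw [hlent]
      · rw [if_neg (by rw [PySem.List.len_eq]; exact hin)]
        congr 2
        have hdlen : (viewFrom words F).length ≤ t := by omega
        rw [List.take_of_length_le hdlen, List.take_of_length_le (by omega)]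

lemma unpack_bits_alt_eq (words : List Int) (start_bit width : Int) (hw : 0 < width)
    (hf : -(words.length : Int) ≤ PySem.Int.floordiv start_bit 32) :
    unpack_bits_alt words start_bit width =
      ((XN (viewFrom words (PySem.Int.floordiv start_bit 32)) /
          2 ^ (PySem.Int.mod start_bit 32).toNat % 2 ^ width.toNat : Nat) : Int) := by
  unfold unpack_bits_alt
  rw [if_neg (by omega), if_neg (by omega)]
  set W : Nat := width.toNat with hW
  have hW' : width = (W : Int) := by omega
  have hW1 : 1 ≤ W := by omega
  set F : Int := PySem.Int.floordiv start_bit 32 with hF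
  set L : Int := PySem.Int.floordiv (start_bit + width - 1) 32 with hL
  have hFL : F ≤ L := by
    rw [hF, hL, PySem.Int.floordiv_eq_ediv_of_pos (by norm_num),
        PySem.Int.floordiv_eq_ediv_of_pos (by norm_num)]
    exact Int.ediv_le_ediv (by norm_num) (by omega)
  set T : Nat := (L + 1 - F).toNat with hT
  have hTI : (T : Int) = L + 1 - F := by omega
  show PySem.Int.band
      (((PySem.List.pyRange F (L + 1) 1).foldl
        (fun acc i =>
          if i < PySem.List.len words then
            PySem.Int.bor acc
              ((PySem.Int.band (PySem.List.pyGetD words i 0) 4294967295) <<< (32 * (i - F)).toNat)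
          else acc) 0) >>> (start_bit - 32 * F).toNat) ((((1 <<< W : Nat) : Int)) - 1) =
    ((XN (viewFrom words F) / 2 ^ (PySem.Int.mod start_bit 32).toNat % 2 ^ W : Nat) : Int)
  rw [show L + 1 = F + (T : Int) from by omega, acc_eq words F hf T]
  have hdm := PySem.Int.floordiv_mul_add_mod start_bit 32
  have hm0 := PySem.Int.mod_nonneg start_bit (b := 32) (by norm_num)
  have hmlt := PySem.Int.mod_lt start_bit (b := 32) (by norm_num)
  set S' : Nat := (PySem.Int.mod start_bit 32).toNat with hS'
  have hbo : (start_bit - 32 * F).toNat = S' := by omega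
  rw [hbo]
  set accN : Nat := XN ((viewFrom words F).take T) with haccN
  have hshr : ((accN : Nat) : Int) >>> S' = ((accN >>> S' : Nat) : Int) := by
    rw [Int.natCast_shiftRight]
  have hmask : (((1 <<< W : Nat) : Int)) - 1 = ((2 ^ W : Nat) : Int) - 1 := by
    rw [Nat.shiftLeft_eq, Nat.one_mul]
  rw [hshr, hmask, band_two_pow_sub_one]
  rw [show ((2 : Int) ^ W) = ((2 ^ W : Nat) : Int) from by push_cast; ring, ← Int.natCast_mod]
  congr 1
  rw [Nat.shiftRight_eq_div_pow]
  have haccmod : accN = XN (viewFrom words F) % 2 ^ (32 * T) := by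
    rw [haccN, XN_mod_pow32]
  have hdm2 := PySem.Int.floordiv_mul_add_mod (start_bit + width - 1) 32
  have hm02 := PySem.Int.mod_nonneg (start_bit + width - 1) (b := 32) (by norm_num)
  have hmlt2 := PySem.Int.mod_lt (start_bit + width - 1) (b := 32) (by norm_num)
  have hle : S' + W ≤ 32 * T := by omega
  rw [haccmod, mod_pow_div_mod _ _ _ _ hle]

-- ===== VERDICT (by name: the statement is the Claim_ definition above) =====
theorem unpack_bits_spec : Claim_equal_unpack_bits := by
  intro words start_bit width _hDom hPre
  rcases hPre with ⟨hw0, hor⟩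
  rcases lt_or_eq_of_le hw0 with hw | hw
  · have hf : -(words.length : Int) ≤ PySem.Int.floordiv start_bit 32 := by
      rcases hor with h | h
      · omega
      · exact h
    show unpack_bits words start_bit width = unpack_bits_alt words start_bit width
    rw [unpack_bits_eq words start_bit width hw hf,
        unpack_bits_alt_eq words start_bit width hw hf]
  · show unpack_bits words start_bit width = unpack_bits_alt words start_bit width
    simp [unpack_bits, unpack_bits_alt, ← hw]
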